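-- pv_equiv track=rewrite | github.com/mj1618/icfp2025-py-sat-solver | main.py | compute_walk
-- ===== SOURCE A (Python) =====
-- def compute_walk(walk, conns, labels):
--     curr = 0
--     result = [0]
--     for i in range(len(walk)):
--         next = conns[curr][walk[i]]
--         result.append(labels[next])
--         curr = next
--     return result
-- ===== SOURCE B (Python) =====
-- def compute_walk(walk, conns, labels):
--     # Divide and conquer: solve(curr, lo, hi) returns the label segment for
--     # walk[lo:hi] started at node curr, together with the node reached at the end.
--     def solve(curr, lo, hi):
--         if hi - lo == 0:
--             return [], curr
--         if hi - lo == 1: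
--             n = conns[curr][walk[lo]]
--             return [labels[n]], n
--         mid = (lo + hi) // 2
--         left, m = solve(curr, lo, mid)
--         right, e = solve(m, mid, hi)
--         return left + right, e
--     return [0] + solve(0, 0, len(walk))[0]
-- ===== Notes on version B (the rewrite author's own statement) =====
-- stated objective: alternative
-- what changed: A walks the sequence left to right with a mutable current node, appending one label per step; B solves the problem by divide and conquer, recursively splitting the walk in halves, each call returning the label segment together with the node reached at its end, and concatenating the halves.
import Mathlib
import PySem

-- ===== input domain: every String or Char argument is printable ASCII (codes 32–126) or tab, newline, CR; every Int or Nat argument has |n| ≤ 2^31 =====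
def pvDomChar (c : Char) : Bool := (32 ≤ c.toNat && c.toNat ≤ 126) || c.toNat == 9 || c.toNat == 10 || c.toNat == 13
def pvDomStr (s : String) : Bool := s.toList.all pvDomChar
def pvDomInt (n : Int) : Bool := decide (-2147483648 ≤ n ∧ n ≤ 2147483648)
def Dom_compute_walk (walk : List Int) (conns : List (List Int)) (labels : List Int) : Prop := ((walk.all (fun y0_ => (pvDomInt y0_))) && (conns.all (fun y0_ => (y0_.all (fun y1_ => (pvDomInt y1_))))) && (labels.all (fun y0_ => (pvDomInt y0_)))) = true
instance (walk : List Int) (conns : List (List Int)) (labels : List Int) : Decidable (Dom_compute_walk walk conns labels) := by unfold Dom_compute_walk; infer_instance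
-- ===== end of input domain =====

-- B replaces A's sequential scan by a divide-and-conquer recursion over the walk (alternative decomposition, same result).

-- ===== PORT A =====
def compute_walk (walk : List Int) (conns : List (List Int)) (labels : List Int) : List Int :=
  (walk.foldl (fun (st : Int × List Int) w =>
      let nxt := ((PySem.List.pyGet? conns st.1).bind (fun row => PySem.List.pyGet? row w)).getD 0
      (nxt, st.2 ++ [(PySem.List.pyGet? labels nxt).getD 0]))
    (0, [0])).2

-- ===== PORT B =====
-- the next-node step: conns[curr][w]
def cwNext (conns : List (List Int)) (c w : Int) : Int :=
  ((PySem.List.pyGet? conns c).bind (fun row => PySem.List.pyGet? row w)).getD 0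

-- solve(curr, lo, hi) of Source B, carried out on the walk segment walk[lo:hi] itself:
-- returns (label segment, end node); splits the segment at mid = len // 2.
def cwSolve (conns : List (List Int)) (labels : List Int) : Int → List Int → List Int × Int
  | c, [] => ([], c)
  | c, [w] =>
      let n := cwNext conns c w
      ([(PySem.List.pyGet? labels n).getD 0], n)
  | c, w1 :: w2 :: rest =>
      let ws := w1 :: w2 :: rest
      let mid := ws.length / 2
      let l := cwSolve conns labels c (ws.take mid)
      let r := cwSolve conns labels l.2 (ws.drop mid)
      (l.1 ++ r.1, r.2)
termination_by _ ws => ws.length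
decreasing_by
  · simp [List.length_take]; omega
  · simp; omega

def compute_walk_alt (walk : List Int) (conns : List (List Int)) (labels : List Int) : List Int :=
  0 :: (cwSolve conns labels 0 walk).1

-- ===== PRECONDITION & SPEC =====
-- Pre_ excludes exactly the inputs on which A raises an IndexError: every step of the walk,
-- starting from node 0, must index an existing row of conns, an existing entry of that row,
-- and reach a node that has a label (Python's negative-index wraparound counts as valid).
def cwOk (conns : List (List Int)) (labels : List Int) : Int → List Int → Bool
  | _, [] => true
  | c, w :: ws =>
    match PySem.List.pyGet? conns c with
    | none => false
    | some row =>
      match PySem.List.pyGet? row w with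
      | none => false
      | some n => decide (PySem.Raise.InRange labels.length n) && cwOk conns labels n ws

def Pre_compute_walk (walk : List Int) (conns : List (List Int)) (labels : List Int) : Prop :=
  cwOk conns labels 0 walk = true

instance (walk : List Int) (conns : List (List Int)) (labels : List Int) : Decidable (Pre_compute_walk walk conns labels) := by unfold Pre_compute_walk; infer_instance

def pvWitness_compute_walk : List Int × List (List Int) × List Int :=
  ([1, 0, -1], [[1, 0], [0, 1]], [3, 7])

def Spec_compute_walk (walk : List Int) (conns : List (List Int)) (labels : List Int) (out : List Int) : Prop := out = compute_walk_alt walk conns labels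
instance (walk : List Int) (conns : List (List Int)) (labels : List Int) (out : List Int) : Decidable (Spec_compute_walk walk conns labels out) := by unfold Spec_compute_walk; infer_instance

-- ===== CLAIM (what is proved, stated in full; the proofs are below) =====
def Claim_equal_compute_walk : Prop := ∀ (walk : List Int) (conns : List (List Int)) (labels : List Int), Dom_compute_walk walk conns labels → Pre_compute_walk walk conns labels → Spec_compute_walk walk conns labels (compute_walk walk conns labels)

-- ===== LEMMAS AND PROOFS =====

-- the abstract trajectory (excluding the start node) and the end node
def cwTraj (conns : List (List Int)) : List Int → Int → List Int
  | [], _ => []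
  | w :: ws, c => cwNext conns c w :: cwTraj conns ws (cwNext conns c w)

def cwEnd (conns : List (List Int)) : Int → List Int → Int
  | c, [] => c
  | c, w :: ws => cwEnd conns (cwNext conns c w) ws

theorem cwTraj_append (conns : List (List Int)) :
    ∀ (xs ys : List Int) (c : Int),
    cwTraj conns (xs ++ ys) c = cwTraj conns xs c ++ cwTraj conns ys (cwEnd conns c xs) := by
  intro xs
  induction xs with
  | nil => intro ys c; simp [cwTraj, cwEnd]
  | cons x xs ih => intro ys c; simp [cwTraj, cwEnd, ih]

theorem cwEnd_append (conns : List (List Int)) :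
    ∀ (xs ys : List Int) (c : Int),
    cwEnd conns c (xs ++ ys) = cwEnd conns (cwEnd conns c xs) ys := by
  intro xs
  induction xs with
  | nil => intro ys c; simp [cwEnd]
  | cons x xs ih => intro ys c; simp [cwEnd, ih]

theorem cwSolve_eq (conns : List (List Int)) (labels : List Int) :
    ∀ (c : Int) (ws : List Int),
    cwSolve conns labels c ws
      = ((cwTraj conns ws c).map (fun n => (PySem.List.pyGet? labels n).getD 0),
         cwEnd conns c ws) := by
  intro c ws
  induction c, ws using cwSolve.induct conns labels with
  | case1 c => simp [cwSolve, cwTraj, cwEnd]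
  | case2 c w => simp [cwSolve, cwTraj, cwEnd]
  | case3 c w1 w2 rest ws mid l ihA _ ihB =>
    rw [cwSolve]
    simp only [ws, mid, l] at ihA ihB
    simp only [List.length_cons] at ihA ihB ⊢
    rw [ihB, ihA]
    have hsplit : (w1 :: w2 :: rest).take ((rest.length + 1 + 1) / 2)
        ++ (w1 :: w2 :: rest).drop ((rest.length + 1 + 1) / 2) = w1 :: w2 :: rest :=
      List.take_append_drop _ _
    conv_rhs => rw [← hsplit]
    rw [cwTraj_append, cwEnd_append]
    simp

theorem foldA_eq (conns : List (List Int)) (labels : List Int) :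
    ∀ (ws : List Int) (c : Int) (res : List Int),
    (ws.foldl (fun (st : Int × List Int) w =>
        let nxt := ((PySem.List.pyGet? conns st.1).bind (fun row => PySem.List.pyGet? row w)).getD 0
        (nxt, st.2 ++ [(PySem.List.pyGet? labels nxt).getD 0]))
      (c, res)).2
    = res ++ (cwTraj conns ws c).map (fun n => (PySem.List.pyGet? labels n).getD 0) := by
  intro ws
  induction ws with
  | nil => intro c res; simp [cwTraj]
  | cons w ws ih =>
    intro c res
    simp only [List.foldl_cons, cwTraj, List.map_cons]
    rw [ih]
    simp [cwNext, List.append_assoc]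

-- ===== VERDICT (by name: the statement is the Claim_ definition above) =====
theorem compute_walk_spec : Claim_equal_compute_walk := by
  intro walk conns labels _ _
  unfold Spec_compute_walk compute_walk compute_walk_alt
  rw [foldA_eq, cwSolve_eq]
  simp
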